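-- pv_equiv track=rewrite | github.com/ardatalar/EuropeOrthoViewer | wmts_utils.py | _prefer_format
-- ===== SOURCE A (Python) =====
-- from typing import Dict, List, Optional
--
-- def _prefer_format(fmts: List[str]) -> Optional[str]:
--     """
--     Choose a concrete image format. Filter out pseudo/union tokens like 'image/jpgpng'.
--     Preference: PNG (png, png8, png32) -> any png-like -> JPEG -> first remaining.
--     """
--     if not fmts:
--         return None
--
--     lower_pairs = [(f, f.lower()) for f in fmts if f]
--     filtered = [orig for (orig, low) in lower_pairs if low not in {"image/jpgpng"}]
--     candidates = filtered if filtered else [orig for (orig, _) in lower_pairs]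
--
--     for pref in ("image/png", "image/png8", "image/png32"):
--         for c in candidates:
--             if c.lower() == pref:
--                 return c
--
--     for c in candidates:
--         if "png" in c.lower():
--             return c
--
--     for pref in ("image/jpeg", "image/jpg"):
--         for c in candidates:
--             if c.lower() == pref:
--                 return c
--
--     return candidates[0] if candidates else None
-- ===== SOURCE B (Python) =====
-- from typing import List, Optional
--
--
-- def _prio(c: str) -> int:
--     low = c.lower()
--     if low == "image/png":
--         return 0
--     if low == "image/png8":
--         return 1
--     if low == "image/png32":
--         return 2
--     if "png" in low:
--         return 3
--     if low == "image/jpeg":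
--         return 4
--     if low == "image/jpg":
--         return 5
--     return 6
--
--
-- def _prefer_format(fmts: List[str]) -> Optional[str]:
--     nonempty = [f for f in fmts if f]
--     filtered = [f for f in nonempty if f.lower() != "image/jpgpng"]
--     candidates = filtered or nonempty
--     return min(candidates, key=_prio) if candidates else None
-- ===== Notes on version B (the rewrite author's own statement) =====
-- stated objective: simpler
-- what changed: Replaces A's six sequential first-match scans over the candidate list by a single min(candidates, key=_prio) pass with a 0-6 priority function, relying on Python min's first-extremal tie-breaking.
import Mathlib
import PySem

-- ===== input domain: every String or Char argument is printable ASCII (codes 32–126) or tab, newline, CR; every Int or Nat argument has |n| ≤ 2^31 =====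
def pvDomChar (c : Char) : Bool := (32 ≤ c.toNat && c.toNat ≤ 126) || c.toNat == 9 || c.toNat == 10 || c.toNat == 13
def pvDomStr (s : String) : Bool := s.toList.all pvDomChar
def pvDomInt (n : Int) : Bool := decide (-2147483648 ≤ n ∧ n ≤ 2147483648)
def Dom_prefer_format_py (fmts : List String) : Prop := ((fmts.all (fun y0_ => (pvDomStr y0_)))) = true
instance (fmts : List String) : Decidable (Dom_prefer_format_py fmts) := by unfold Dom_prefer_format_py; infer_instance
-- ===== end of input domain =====

-- B replaces A's six sequential first-match scans by one min-by-priority pass (objective: simpler).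

-- ===== PORT A =====
-- inner loop 'for c in candidates: if <p c>: return c' of A
def pvFind (p : String → Bool) : List String → Option String
  | [] => none
  | c :: cs => if p c then some c else pvFind p cs

def prefer_format_py (fmts : List String) : Option String :=
  if fmts = [] then none
  else
    let lower_pairs := (fmts.filter (fun f => f ≠ "")).map (fun f => (f, PySem.Str.lower f))
    let filtered := (lower_pairs.filter (fun p => p.2 ∉ ["image/jpgpng"])).map (fun p => p.1)
    let candidates := if filtered ≠ [] then filtered else lower_pairs.map (fun p => p.1)
    -- outer loop over the literal tuple of prefs, unrolled
    match pvFind (fun c => PySem.Str.lower c = "image/png") candidates with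
    | some c => some c
    | none =>
    match pvFind (fun c => PySem.Str.lower c = "image/png8") candidates with
    | some c => some c
    | none =>
    match pvFind (fun c => PySem.Str.lower c = "image/png32") candidates with
    | some c => some c
    | none =>
    match pvFind (fun c => PySem.Str.isIn "png" (PySem.Str.lower c)) candidates with
    | some c => some c
    | none =>
    match pvFind (fun c => PySem.Str.lower c = "image/jpeg") candidates with
    | some c => some c
    | none =>
    match pvFind (fun c => PySem.Str.lower c = "image/jpg") candidates with
    | some c => some c
    | none => if candidates ≠ [] then candidates.head? else none

-- ===== PORT B =====
def pvPrio (c : String) : Nat :=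
  let low := PySem.Str.lower c
  if low = "image/png" then 0
  else if low = "image/png8" then 1
  else if low = "image/png32" then 2
  else if PySem.Str.isIn "png" low then 3
  else if low = "image/jpeg" then 4
  else if low = "image/jpg" then 5
  else 6

def prefer_format_py_alt (fmts : List String) : Option String :=
  let nonempty := fmts.filter (fun f => f ≠ "")
  let filtered := nonempty.filter (fun f => PySem.Str.lower f ≠ "image/jpgpng")
  let candidates := if filtered ≠ [] then filtered else nonempty
  if candidates ≠ [] then PySem.List.min? candidates pvPrio else none

-- ===== PRECONDITION & SPEC =====
def Spec_prefer_format_py (fmts : List String) (out : Option String) : Prop := out = prefer_format_py_alt fmts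
instance (fmts : List String) (out : Option String) : Decidable (Spec_prefer_format_py fmts out) := by unfold Spec_prefer_format_py; infer_instance

-- ===== CLAIM (what is proved, stated in full; the proofs are below) =====
def Claim_equal_prefer_format_py : Prop := ∀ (fmts : List String), Dom_prefer_format_py fmts → Spec_prefer_format_py fmts (prefer_format_py fmts)

-- ===== LEMMAS AND PROOFS =====

-- the tier predicates of A, in order
def pvPreds : List (String → Bool) :=
  [ fun c => PySem.Str.lower c = "image/png"
  , fun c => PySem.Str.lower c = "image/png8"
  , fun c => PySem.Str.lower c = "image/png32"
  , fun c => PySem.Str.isIn "png" (PySem.Str.lower c)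
  , fun c => PySem.Str.lower c = "image/jpeg"
  , fun c => PySem.Str.lower c = "image/jpg" ]

-- A's tier chain, generically over a list of predicates
def pvChain : List (String → Bool) → List String → Option String
  | [], cs => cs.head?
  | p :: ps, cs => match pvFind p cs with
    | some c => some c
    | none => pvChain ps cs

-- index of the first satisfied predicate (length if none)
def pvPrioG : List (String → Bool) → String → Nat
  | [], _ => 0
  | p :: ps, c => if p c then 0 else pvPrioG ps c + 1

theorem pvFind_eq_find? (p : String → Bool) (l : List String) : pvFind p l = l.find? p := by
  induction l with
  | nil => rfl
  | cons x xs ih => simp [pvFind, List.find?_cons, ih]; split <;> simp_all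

theorem pvPrio_eq (c : String) : pvPrio c = pvPrioG pvPreds c := by
  simp only [pvPrio, pvPrioG, pvPreds]
  split_ifs <;> simp_all

theorem pvChain_nil (ps : List (String → Bool)) : pvChain ps [] = none := by
  induction ps with
  | nil => rfl
  | cons p ps ih => simp [pvChain, pvFind, ih]

theorem pvChain_mem {ps : List (String → Bool)} {cs : List String} {m : String}
    (h : pvChain ps cs = some m) : m ∈ cs := by
  induction ps with
  | nil => simp [pvChain] at h; exact List.mem_of_mem_head? (by simp [h])
  | cons p ps ih =>
    simp only [pvChain, pvFind_eq_find?] at h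
    rcases hf : cs.find? p with _ | c
    · rw [hf] at h; exact ih h
    · rw [hf] at h; cases h; exact List.mem_of_find?_eq_some hf

-- the crux: A's chain satisfies the same cons recursion as Python's first-extremal min
theorem pvChain_cons (ps : List (String → Bool)) (x : String) (xs : List String) :
    pvChain ps (x :: xs) =
      match pvChain ps xs with
      | none => some x
      | some m => if pvPrioG ps m < pvPrioG ps x then some m else some x := by
  induction ps with
  | nil =>
    simp only [pvChain, pvPrioG]
    cases xs.head? <;> simp
  | cons p ps ih =>
    by_cases hx : p x
    · have h1 : pvChain (p :: ps) (x :: xs) = some x := by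
        simp [pvChain, pvFind, hx]
      rw [h1]
      rcases h : pvChain (p :: ps) xs with _ | m
      · rfl
      · have hx0 : pvPrioG (p :: ps) x = 0 := by simp [pvPrioG, hx]
        rw [hx0]
        simp
    · have hx' : p x = false := by simpa using hx
      rcases hf : xs.find? p with _ | c
      · have hall : ∀ y ∈ xs, ¬ p y = true := List.find?_eq_none.mp hf
        have h1 : pvChain (p :: ps) (x :: xs) = pvChain ps (x :: xs) := by
          simp [pvChain, pvFind_eq_find?, hx', hf]
        have h2 : pvChain (p :: ps) xs = pvChain ps xs := by
          simp [pvChain, pvFind_eq_find?, hf]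
        rw [h1, h2, ih]
        rcases h : pvChain ps xs with _ | m
        · rfl
        · have hm : m ∈ xs := pvChain_mem h
          have hpm : p m = false := by simpa using hall m hm
          simp [pvPrioG, hx', hpm]
      · have hc : p c = true := List.find?_some hf
        have h1 : pvChain (p :: ps) (x :: xs) = some c := by
          simp [pvChain, pvFind_eq_find?, hx', hf]
        have h2 : pvChain (p :: ps) xs = some c := by
          simp [pvChain, pvFind_eq_find?, hf]
        rw [h1, h2]
        simp [pvPrioG, hx', hc]

-- Python min's running-best step
def pvStep (key : String → Nat) : Option String → String → Option String :=
  fun acc y =>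
    match acc with
    | none => some y
    | some m => if key y < key m then some y else some m

theorem pvFold_some (key : String → Nat) (l : List String) :
    ∀ (a : String), l.foldl (pvStep key) (some a) =
      match l.foldl (pvStep key) none with
      | none => some a
      | some m => if key m < key a then some m else some a := by
  induction l with
  | nil => intro a; rfl
  | cons y t ih =>
    intro a
    simp only [List.foldl_cons]
    have hn : pvStep key none y = some y := rfl
    by_cases h : key y < key a
    · have ha : pvStep key (some a) y = some y := by simp [pvStep, h]
      rw [ha, hn, ih y]
      rcases hF : t.foldl (pvStep key) none with _ | m
      · simp [h]
      · by_cases h2 : key m < key y <;> simp [h2] <;> intro h3 <;> omega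
    · have ha : pvStep key (some a) y = some a := by simp [pvStep, h]
      rw [ha, hn, ih a, ih y]
      rcases hF : t.foldl (pvStep key) none with _ | m
      · simp
        omega
      · by_cases h2 : key m < key y <;> simp [h2] <;>
          split_ifs <;> first | rfl | omega

-- Python's min(_, key) cons recursion (first extremal element)
theorem pvMin_cons (key : String → Nat) (x : String) (xs : List String) :
    PySem.List.min? (x :: xs) key =
      match PySem.List.min? xs key with
      | none => some x
      | some m => if key m < key x then some m else some x := by
  have h1 : PySem.List.min? (x :: xs) key = xs.foldl (pvStep key) (some x) := by
    unfold PySem.List.min?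
    rw [List.foldl_cons]
    apply List.foldl_ext
    intro acc z _; cases acc <;> rfl
  have h2 : PySem.List.min? xs key = xs.foldl (pvStep key) none := by
    unfold PySem.List.min?
    apply List.foldl_ext
    intro acc z _; cases acc <;> rfl
  rw [h1, h2, pvFold_some]

theorem pvChain_eq_min (cs : List String) :
    pvChain pvPreds cs = PySem.List.min? cs pvPrio := by
  induction cs with
  | nil => rw [pvChain_nil]; rfl
  | cons x xs ih =>
    rw [pvChain_cons, pvMin_cons, ih]
    rcases h : PySem.List.min? xs pvPrio with _ | m <;> simp [pvPrio_eq]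

theorem pvHead_if (cs : List String) : cs.head? = if cs ≠ [] then cs.head? else none := by
  cases cs <;> simp

-- A's tier chain, with A's final line, equals pvChain with the tier predicates
theorem pvBody_eq (cs : List String) :
    (match pvFind (fun c => PySem.Str.lower c = "image/png") cs with
    | some c => some c
    | none =>
    match pvFind (fun c => PySem.Str.lower c = "image/png8") cs with
    | some c => some c
    | none =>
    match pvFind (fun c => PySem.Str.lower c = "image/png32") cs with
    | some c => some c
    | none =>
    match pvFind (fun c => PySem.Str.isIn "png" (PySem.Str.lower c)) cs with
    | some c => some c
    | none =>
    match pvFind (fun c => PySem.Str.lower c = "image/jpeg") cs with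
    | some c => some c
    | none =>
    match pvFind (fun c => PySem.Str.lower c = "image/jpg") cs with
    | some c => some c
    | none => if cs ≠ [] then cs.head? else none) = pvChain pvPreds cs := by
  rw [← pvHead_if]
  simp only [pvPreds, pvChain]

-- A's pair-based filtering builds the same candidate list as B's direct filter
theorem pvFilter_eq (l : List String) :
    ((l.map (fun f => (f, PySem.Str.lower f))).filter
        (fun p => p.2 ∉ ["image/jpgpng"])).map (fun p => p.1) =
      l.filter (fun f => PySem.Str.lower f ≠ "image/jpgpng") := by
  induction l with
  | nil => rfl
  | cons x t ih =>
    by_cases h : PySem.Str.lower x = "image/jpgpng" <;>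
      simp [h] <;> simpa using ih

theorem pvChain_eq_alt (cs : List String) :
    pvChain pvPreds cs = if cs ≠ [] then PySem.List.min? cs pvPrio else none := by
  cases cs with
  | nil => rw [pvChain_nil]; rfl
  | cons x xs => simp [pvChain_eq_min]

-- ===== VERDICT (by name: the statement is the Claim_ definition above) =====
theorem prefer_format_py_spec : Claim_equal_prefer_format_py := by
  intro fmts _
  unfold Spec_prefer_format_py prefer_format_py prefer_format_py_alt
  by_cases hf : fmts = []
  · subst hf; rfl
  · simp only [if_neg hf]
    rw [pvBody_eq, pvFilter_eq, pvChain_eq_alt]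
    simp [List.map_map, Function.comp_def]
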